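-- pv_equiv track=rewrite | github.com/mohsenzolfagharian/words_ahmad | queries and proccess.py | pre_verb_post
-- ===== SOURCE A (Python) =====
-- def pre_verb_post(pre, verb, post):
--     words = []
--     for x in pre:
--         for y in verb:
--             for z in post:
--                 word = x+y+z
--                 words.append(word)
--
--     return words
-- ===== SOURCE B (Python) =====
-- def pre_verb_post(pre, verb, post):
--     nv, nz = len(verb), len(post)
--     total = len(pre) * nv * nz
--     return [pre[i // (nv * nz)] + verb[(i // nz) % nv] + post[i % nz]
--             for i in range(total)]
-- ===== Notes on version B (the rewrite author's own statement) =====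
-- stated objective: alternative
-- what changed: B replaces A's three nested loops by a single flat loop over range(len(pre)*len(verb)*len(post)) that decodes each flat index into its three component indices with floor-division and modulo (mixed-radix decoding), indexing the lists directly.
import Mathlib
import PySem

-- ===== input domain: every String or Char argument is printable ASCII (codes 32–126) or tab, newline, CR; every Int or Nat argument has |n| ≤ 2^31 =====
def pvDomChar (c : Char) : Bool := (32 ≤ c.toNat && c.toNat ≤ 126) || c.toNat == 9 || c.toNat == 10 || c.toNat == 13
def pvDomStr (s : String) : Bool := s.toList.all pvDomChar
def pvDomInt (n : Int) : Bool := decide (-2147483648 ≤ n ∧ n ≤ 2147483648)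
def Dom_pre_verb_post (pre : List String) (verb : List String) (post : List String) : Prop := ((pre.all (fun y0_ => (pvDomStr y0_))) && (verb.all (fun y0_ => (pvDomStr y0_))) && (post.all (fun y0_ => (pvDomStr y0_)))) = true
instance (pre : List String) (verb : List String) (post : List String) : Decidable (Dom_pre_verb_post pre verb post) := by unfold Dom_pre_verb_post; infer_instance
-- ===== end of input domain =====

-- B changes the algorithm shape: one flat loop with mixed-radix index decoding instead of three nested loops (alternative, not faster).

-- ===== PORT A =====
def pre_verb_post (pre : List String) (verb : List String) (post : List String) : List String :=
  pre.foldl (fun words x =>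
    verb.foldl (fun words y =>
      post.foldl (fun words z => words ++ [x ++ y ++ z]) words) words) []

-- ===== PORT B =====
-- single pass over a flat range; each index is decoded by // and % (indices are always in range, so pyGetD's default is never used)
def pre_verb_post_alt (pre : List String) (verb : List String) (post : List String) : List String :=
  let nv : Int := verb.length
  let nz : Int := post.length
  let total : Int := (pre.length : Int) * nv * nz
  (PySem.List.pyRange 0 total 1).map (fun i =>
    PySem.List.pyGetD pre (PySem.Int.floordiv i (nv * nz)) "" ++
    PySem.List.pyGetD verb (PySem.Int.mod (PySem.Int.floordiv i nz) nv) "" ++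
    PySem.List.pyGetD post (PySem.Int.mod i nz) "")

-- ===== PRECONDITION & SPEC =====
def Spec_pre_verb_post (pre : List String) (verb : List String) (post : List String) (out : List String) : Prop := out = pre_verb_post_alt pre verb post
instance (pre : List String) (verb : List String) (post : List String) (out : List String) : Decidable (Spec_pre_verb_post pre verb post out) := by unfold Spec_pre_verb_post; infer_instance

-- ===== CLAIM (what is proved, stated in full; the proofs are below) =====
def Claim_equal_pre_verb_post : Prop := ∀ (pre : List String) (verb : List String) (post : List String), Dom_pre_verb_post pre verb post → Spec_pre_verb_post pre verb post (pre_verb_post pre verb post)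

-- ===== LEMMAS AND PROOFS =====

-- A's inner two loops as a flatMap
theorem pvp_inner_loops (verb post : List String) (f : String → String → String)
    (acc : List String) :
    verb.foldl (fun words y => post.foldl (fun words z => words ++ [f y z]) words) acc
      = acc ++ verb.flatMap (fun y => post.map (f y)) := by
  induction verb generalizing acc with
  | nil => simp
  | cons y ys ih =>
    simp only [List.foldl_cons, List.flatMap_cons]
    rw [PySem.List.foldl_append_singleton_eq_map, ih, List.append_assoc]

-- A's whole triple loop as nested flatMaps
theorem pvp_A_eq (pre verb post : List String) (acc : List String) :
    pre.foldl (fun words x =>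
      verb.foldl (fun words y => post.foldl (fun words z => words ++ [x ++ y ++ z]) words) words) acc
    = acc ++ pre.flatMap (fun x => verb.flatMap (fun y => post.map (fun z => x ++ y ++ z))) := by
  induction pre generalizing acc with
  | nil => simp
  | cons w ws ih =>
    simp only [List.foldl_cons, List.flatMap_cons]
    rw [pvp_inner_loops, ih, List.append_assoc]

-- splitting a range over a product into a double pass
theorem pvp_range_mul {α : Type} (m n : Nat) (f : Nat → α) :
    (List.range (m * n)).map f
      = (List.range m).flatMap (fun i => (List.range n).map (fun j => f (i * n + j))) := by
  induction m with
  | zero => simp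
  | succ m ih =>
    rw [Nat.succ_mul, List.range_add, List.map_append, ih, List.range_succ,
        List.flatMap_append]
    simp [List.map_map, Function.comp_def]

-- replacing an index pass by a direct pass over the list
theorem pvp_range_getD {α β : Type} (xs : List α) (d : α) (g : α → β) :
    (List.range xs.length).map (fun i => g (xs.getD i d)) = xs.map g := by
  induction xs with
  | nil => simp
  | cons x t ih =>
    rw [List.length_cons, List.range_succ_eq_map, List.map_cons, List.map_map]
    simpa [Function.comp_def] using ih

theorem pvp_range_getD_flat {α β : Type} (xs : List α) (d : α) (g : α → List β) :
    (List.range xs.length).flatMap (fun i => g (xs.getD i d)) = xs.flatMap g := by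
  induction xs with
  | nil => simp
  | cons x t ih =>
    rw [List.length_cons, List.range_succ_eq_map, List.flatMap_cons, List.flatMap_map]
    simpa [Function.comp_def] using ih

-- the three range passes with positional indexing equal the three direct list passes
theorem pvp_ranges_to_lists (pre verb post : List String) :
    (List.range pre.length).flatMap (fun i =>
      (List.range verb.length).flatMap (fun j =>
        (List.range post.length).map (fun k =>
          pre.getD i "" ++ verb.getD j "" ++ post.getD k "")))
    = pre.flatMap (fun x => verb.flatMap (fun y => post.map (fun z => x ++ y ++ z))) := by
  have h1 : (fun i =>
      (List.range verb.length).flatMap (fun j =>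
        (List.range post.length).map (fun k =>
          pre.getD i "" ++ verb.getD j "" ++ post.getD k "")))
      = (fun i => verb.flatMap (fun y => post.map (fun z => pre.getD i "" ++ y ++ z))) := by
    funext i
    have h2 : (fun j => (List.range post.length).map (fun k =>
          pre.getD i "" ++ verb.getD j "" ++ post.getD k ""))
        = (fun j => post.map (fun z => pre.getD i "" ++ verb.getD j "" ++ z)) := by
      funext j
      exact pvp_range_getD post "" (fun z => pre.getD i "" ++ verb.getD j "" ++ z)
    rw [h2]
    exact pvp_range_getD_flat verb "" (fun y => post.map (fun z => pre.getD i "" ++ y ++ z))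
  rw [h1]
  exact pvp_range_getD_flat pre "" (fun x => verb.flatMap (fun y => post.map (fun z => x ++ y ++ z)))

-- decoding the flat index i*(V*Z) + (j*Z + k) recovers (i, j, k)
theorem pvp_decode (pre verb post : List String) (i j k : Nat)
    (hj : j < verb.length) (hk : k < post.length) :
    PySem.List.pyGetD pre (PySem.Int.floordiv ((i * (verb.length * post.length) + (j * post.length + k) : Nat) : Int) ((verb.length : Int) * (post.length : Int))) "" ++
    PySem.List.pyGetD verb (PySem.Int.mod (PySem.Int.floordiv ((i * (verb.length * post.length) + (j * post.length + k) : Nat) : Int) (post.length : Int)) (verb.length : Int)) "" ++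
    PySem.List.pyGetD post (PySem.Int.mod ((i * (verb.length * post.length) + (j * post.length + k) : Nat) : Int) (post.length : Int)) ""
    = pre.getD i "" ++ verb.getD j "" ++ post.getD k "" := by
  set V := verb.length with hVdef
  set Z := post.length with hZdef
  have hZ : 0 < Z := by omega
  have hV : 0 < V := by omega
  have hr : j * Z + k < V * Z := by
    have h1 : j * Z + k < (j + 1) * Z := by
      have : (j + 1) * Z = j * Z + Z := by ring
      omega
    exact h1.trans_le (Nat.mul_le_mul (by omega) (le_refl Z))
  have e2 : i * (V * Z) + (j * Z + k) = k + (i * V + j) * Z := by ring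
  have hdiv1 : (i * (V * Z) + (j * Z + k)) / (V * Z) = i := by
    rw [Nat.add_comm, Nat.add_mul_div_right _ _ (Nat.mul_pos hV hZ), Nat.div_eq_of_lt hr,
        Nat.zero_add]
  have hdiv2 : (i * (V * Z) + (j * Z + k)) / Z = i * V + j := by
    rw [e2, Nat.add_mul_div_right _ _ hZ, Nat.div_eq_of_lt hk, Nat.zero_add]
  have hmod2 : (i * V + j) % V = j := by
    rw [Nat.add_comm, Nat.add_mul_mod_self_right, Nat.mod_eq_of_lt hj]
  have hmod3 : (i * (V * Z) + (j * Z + k)) % Z = k := by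
    rw [e2, Nat.add_mul_mod_self_right, Nat.mod_eq_of_lt hk]
  rw [show ((V : Int) * (Z : Int)) = ((V * Z : Nat) : Int) by push_cast; ring]
  simp only [PySem.Int.floordiv_natCast, PySem.Int.mod_natCast, PySem.List.pyGetD_natCast]
  rw [hdiv1, hdiv2, hmod2, hmod3]

-- ===== VERDICT (by name: the statement is the Claim_ definition above) =====
theorem pre_verb_post_spec : Claim_equal_pre_verb_post := by
  intro pre verb post _
  unfold Spec_pre_verb_post pre_verb_post pre_verb_post_alt
  rw [pvp_A_eq]
  simp only [List.nil_append, PySem.List.pyRange_one, List.map_map]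
  have htot : (((pre.length : Int) * (verb.length : Int) * (post.length : Int) - 0)).toNat
      = pre.length * (verb.length * post.length) := by
    have h : ((pre.length : Int) * (verb.length : Int) * (post.length : Int) - 0)
        = ((pre.length * (verb.length * post.length) : Nat) : Int) := by push_cast; ring
    rw [h, Int.toNat_natCast]
  rw [htot, pvp_range_mul]
  simp only [Function.comp_def, zero_add]
  simp only [pvp_range_mul]
  rw [← pvp_ranges_to_lists]
  refine List.flatMap_congr fun i hi => ?_
  refine List.flatMap_congr fun j hj => ?_
  refine List.map_congr_left fun k hk => ?_
  exact (pvp_decode pre verb post i j k (List.mem_range.mp hj) (List.mem_range.mp hk)).symm
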